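-- pv_equiv track=rewrite | github.com/anmapie/advent-of-code | 2020/day20/day20.py | tile_edge_matches
-- ===== SOURCE A (Python) =====
-- def tile_edge_matches(source_tile, candidate_tile):
--     source_edges = build_edge_list(source_tile)
--     candidate_edges = build_edge_list(candidate_tile)
--
--     for source_edge_index, source_edge in enumerate(source_edges):
--         for candidate_edge_index, candidate_edge in enumerate(candidate_edges):
--             if source_edge == candidate_edge or source_edge == candidate_edge[::-1]:
--                 return True
--
--     return False
--
-- def build_edge_list(tile):
--     end_index = len(tile) - 1
--
--     # build columns
--     left_col = ""
--     right_col = ""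
--     for row_index in range(len(tile)):
--         left_col += tile[row_index][0]
--         right_col += tile[row_index][end_index]
--
--     return [tile[0], right_col, tile[end_index], left_col]
-- ===== SOURCE B (Python) =====
-- def tile_edge_matches(source_tile, candidate_tile):
--     # Canonicalize each edge to min(edge, reversed edge), so matching "equal or
--     # reversed" becomes plain set intersection of canonical forms.
--     def canon_edges(tile):
--         end = len(tile) - 1
--         edges = [tile[0],
--                  "".join(row[end] for row in tile),
--                  tile[end],
--                  "".join(row[0] for row in tile)]
--         return {min(e, e[::-1]) for e in edges}
--
--     return not canon_edges(source_tile).isdisjoint(canon_edges(candidate_tile))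
-- ===== Notes on version B (the rewrite author's own statement) =====
-- stated objective: alternative
-- what changed: B canonicalizes every edge to min(edge, reversed edge) and decides the question as non-empty intersection of the two canonical-edge sets, eliminating both A's nested source-by-candidate comparison loop and the explicit 'equal or reversed' test; edge extraction becomes per-row comprehensions instead of string-accumulating loops.
import Mathlib
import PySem

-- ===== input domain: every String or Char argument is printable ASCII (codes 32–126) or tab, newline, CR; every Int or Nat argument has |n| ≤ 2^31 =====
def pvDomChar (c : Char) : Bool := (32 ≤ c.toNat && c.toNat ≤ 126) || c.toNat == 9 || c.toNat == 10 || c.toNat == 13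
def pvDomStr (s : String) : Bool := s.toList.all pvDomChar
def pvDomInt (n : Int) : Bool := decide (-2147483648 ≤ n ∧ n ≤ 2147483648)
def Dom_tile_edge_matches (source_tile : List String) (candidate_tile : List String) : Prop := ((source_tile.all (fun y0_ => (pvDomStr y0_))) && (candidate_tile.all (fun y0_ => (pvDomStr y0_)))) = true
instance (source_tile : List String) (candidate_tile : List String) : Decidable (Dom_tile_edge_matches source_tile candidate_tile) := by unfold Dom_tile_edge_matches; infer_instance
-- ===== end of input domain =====

-- B canonicalizes each edge to min(edge, reversed edge) and decides the question as a non-empty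
-- intersection of the two canonical-edge sets, removing A's nested source×candidate comparison
-- and its explicit "equal or reversed" test (objective: alternative, no speed claim).

-- ===== PORT A =====
-- Edges are represented as List Char (Python compares the strings character-wise; Lean's own String
-- operations are kernel-opaque). Out-of-range indexing, where the Python raises, is totalised with
-- pyGetD defaults; Pre_ excludes exactly those inputs.
def buildEdgeList (tile : List String) : List (List Char) :=
  let endIndex : Int := (tile.length : Int) - 1
  -- "for row_index in range(len(tile)): left_col += tile[row_index][0]; right_col += tile[row_index][end_index]"
  let cols := (PySem.List.pyRange 0 (tile.length : Int) 1).foldl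
    (fun (p : List Char × List Char) rowIndex =>
      let row := PySem.List.pyGetD tile rowIndex ""
      (p.1 ++ [(PySem.Str.pyGet? row 0).getD ' '], p.2 ++ [(PySem.Str.pyGet? row endIndex).getD ' ']))
    ([], [])
  [(PySem.List.pyGetD tile 0 "").toList, cols.2, (PySem.List.pyGetD tile endIndex "").toList, cols.1]

def tile_edge_matches (source_tile : List String) (candidate_tile : List String) : Bool :=
  let source_edges := buildEdgeList source_tile
  let candidate_edges := buildEdgeList candidate_tile
  -- nested for-loops with early "return True"; the enumerate indices are unused in A and dropped.
  -- candidate_edge[::-1] is PySem.List.slice? _ none none (-1) (= reverse, slice?_none_none_neg_one)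
  source_edges.any (fun source_edge =>
    candidate_edges.any (fun candidate_edge =>
      source_edge == candidate_edge ||
      source_edge == (PySem.List.slice? candidate_edge none none (-1)).getD []))

-- ===== PORT B =====
-- min(e, e[::-1]): Python's string min is lexicographic by code point, which on List Char is
-- exactly Mathlib's lexicographic linear order — `min` below is that order's min.
def canonEdge (e : List Char) : List Char := min e e.reverse

def canonEdges (tile : List String) : PySem.Set (List Char) :=
  let endI : Int := (tile.length : Int) - 1
  let edges : List (List Char) :=
    [(PySem.List.pyGetD tile 0 "").toList,
     tile.map (fun row => (PySem.Str.pyGet? row endI).getD ' '),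
     (PySem.List.pyGetD tile endI "").toList,
     tile.map (fun row => (PySem.Str.pyGet? row 0).getD ' ')]
  PySem.Set.ofList (edges.map canonEdge)

def tile_edge_matches_alt (source_tile : List String) (candidate_tile : List String) : Bool :=
  !(PySem.Set.isdisjoint (canonEdges source_tile) (canonEdges candidate_tile))

-- ===== PRECONDITION & SPEC =====
-- Pre_ excludes exactly the inputs where the Python A raises IndexError: an empty tile (tile[0]),
-- or a row shorter than the tile's row count (row[0] / row[len(tile)-1]).
def Pre_tile_edge_matches (source_tile : List String) (candidate_tile : List String) : Prop :=
  source_tile ≠ [] ∧ candidate_tile ≠ [] ∧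
  (∀ row ∈ source_tile, source_tile.length ≤ row.toList.length) ∧
  (∀ row ∈ candidate_tile, candidate_tile.length ≤ row.toList.length)
instance (source_tile : List String) (candidate_tile : List String) : Decidable (Pre_tile_edge_matches source_tile candidate_tile) := by unfold Pre_tile_edge_matches; infer_instance

def pvWitness_tile_edge_matches : List String × List String := (["ab", "cd"], ["bd", "xy"])

def Spec_tile_edge_matches (source_tile : List String) (candidate_tile : List String) (out : Bool) : Prop := out = tile_edge_matches_alt source_tile candidate_tile
instance (source_tile : List String) (candidate_tile : List String) (out : Bool) : Decidable (Spec_tile_edge_matches source_tile candidate_tile out) := by unfold Spec_tile_edge_matches; infer_instance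

-- ===== CLAIM (what is proved, stated in full; the proofs are below) =====
def Claim_equal_tile_edge_matches : Prop := ∀ (source_tile : List String) (candidate_tile : List String), Dom_tile_edge_matches source_tile candidate_tile → Pre_tile_edge_matches source_tile candidate_tile → Spec_tile_edge_matches source_tile candidate_tile (tile_edge_matches source_tile candidate_tile)

-- ===== LEMMAS AND PROOFS =====

-- Proof-side name for the four raw edges as B extracts them.
def rawEdges (tile : List String) : List (List Char) :=
  [(PySem.List.pyGetD tile 0 "").toList,
   tile.map (fun row => (PySem.Str.pyGet? row ((tile.length : Int) - 1)).getD ' '),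
   (PySem.List.pyGetD tile ((tile.length : Int) - 1) "").toList,
   tile.map (fun row => (PySem.Str.pyGet? row 0).getD ' ')]

theorem canonEdges_eq (tile : List String) :
    canonEdges tile = PySem.Set.ofList ((rawEdges tile).map canonEdge) := rfl

-- A's string-accumulating edge extraction computes the same four edges.
theorem buildEdgeList_eq (tile : List String) : buildEdgeList tile = rawEdges tile := by
  simp only [buildEdgeList, rawEdges]
  rw [PySem.List.foldl_pyRange_zero_pyGetD' tile ""
        (fun (p : List Char × List Char) row =>
          (p.1 ++ [(PySem.Str.pyGet? row 0).getD ' '],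
           p.2 ++ [(PySem.Str.pyGet? row ((tile.length : Int) - 1)).getD ' '])) ([], []),
      PySem.List.foldl_prod_mk (f := fun (a : List Char) row => a ++ [(PySem.Str.pyGet? row 0).getD ' '])
        (g := fun (a : List Char) row => a ++ [(PySem.Str.pyGet? row ((tile.length : Int) - 1)).getD ' ']),
      PySem.List.foldl_append_singleton_eq_map, PySem.List.foldl_append_singleton_eq_map]
  simp

-- Canonical forms coincide exactly when the edges are equal or reversed.
theorem canonEdge_eq_iff (e f : List Char) :
    canonEdge e = canonEdge f ↔ e = f ∨ e = f.reverse := by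
  constructor
  · intro h
    unfold canonEdge at h
    rcases min_choice e e.reverse with h1 | h1 <;> rcases min_choice f f.reverse with h2 | h2 <;>
      rw [h1, h2] at h
    · exact Or.inl h
    · exact Or.inr h
    · exact Or.inr (by rw [← h, List.reverse_reverse])
    · exact Or.inl (by have := congrArg List.reverse h; simpa using this)
  · rintro (rfl | rfl)
    · rfl
    · unfold canonEdge
      rw [List.reverse_reverse, min_comm]

-- The nested any-loop equals non-disjointness of the canonical-edge sets.
theorem any_nested_eq_canon (S C : List (List Char)) :
    (S.any fun s => C.any fun c =>
        s == c || s == (PySem.List.slice? c none none (-1)).getD []) =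
      !(PySem.Set.isdisjoint (PySem.Set.ofList (S.map canonEdge))
          (PySem.Set.ofList (C.map canonEdge))) := by
  simp only [PySem.List.slice?_none_none_neg_one, Option.getD_some]
  rw [Bool.eq_iff_iff]
  simp only [List.any_eq_true, Bool.or_eq_true, beq_iff_eq, Bool.not_eq_true',
    ← Bool.not_eq_true, PySem.Set.isdisjoint_iff]
  push Not
  constructor
  · rintro ⟨s, hs, c, hc, h⟩
    refine ⟨canonEdge s, ?_, ?_⟩
    · rw [PySem.Set.mem_ofList]; exact List.mem_map_of_mem hs
    · rw [PySem.Set.mem_ofList, List.mem_map]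
      exact ⟨c, hc, ((canonEdge_eq_iff s c).mpr h).symm⟩
  · rintro ⟨x, hxS, hxC⟩
    rw [PySem.Set.mem_ofList, List.mem_map] at hxS hxC
    obtain ⟨s, hs, rfl⟩ := hxS
    obtain ⟨c, hc, hsc⟩ := hxC
    exact ⟨s, hs, c, hc, (canonEdge_eq_iff s c).mp hsc.symm⟩

-- ===== VERDICT (by name: the statement is the Claim_ definition above) =====
theorem tile_edge_matches_spec : Claim_equal_tile_edge_matches := by
  intro source_tile candidate_tile _ _
  unfold Spec_tile_edge_matches tile_edge_matches tile_edge_matches_alt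
  rw [buildEdgeList_eq, buildEdgeList_eq, canonEdges_eq, canonEdges_eq]
  exact any_nested_eq_canon (rawEdges source_tile) (rawEdges candidate_tile)
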